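-- pv_equiv track=rewrite | github.com/pypi-data/pypi-mirror-397 | packages/80un/80un-0.2.1.tar.gz/80un-0.2.1/src/un80/crlzh.py | build_huffman_decoder
-- ===== SOURCE A (Python) =====
-- def build_huffman_decoder(lengths: list[int]) -> dict[tuple[int, int], int]:
--     """
--     Build a Huffman decoder from code lengths.
--
--     Returns a dict mapping (code, length) to symbol.
--     """
--     if not lengths or max(lengths) == 0:
--         return {}
--
--     max_len = max(lengths)
--     decoder = {}
--
--     # Count codes of each length
--     bl_count = [0] * (max_len + 1)
--     for length in lengths:
--         if length > 0:
--             bl_count[length] += 1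
--
--     # Calculate starting codes for each length
--     code = 0
--     next_code = [0] * (max_len + 1)
--     for bits in range(1, max_len + 1):
--         code = (code + bl_count[bits - 1]) << 1
--         next_code[bits] = code
--
--     # Assign codes to symbols
--     for symbol, length in enumerate(lengths):
--         if length > 0:
--             decoder[(next_code[length], length)] = symbol
--             next_code[length] += 1
--
--     return decoder
-- ===== SOURCE B (Python) =====
-- def build_huffman_decoder(lengths: list[int]) -> dict[tuple[int, int], int]:
--     """
--     Build a Huffman decoder from code lengths.
--
--     For each symbol with positive length l, its canonical code is computed
--     directly in closed form: the number of shorter codes weighted by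
--     2**(l - their length), plus the symbol's rank among earlier symbols of
--     the same length.  No count / next-code tables are needed.
--     """
--     decoder = {}
--     for s, l in enumerate(lengths):
--         if l > 0:
--             code = sum(2 ** (l - x) for x in lengths if 0 < x < l) \
--                  + sum(1 for x in lengths[:s] if x == l)
--             decoder[(code, l)] = s
--     return decoder
-- ===== Notes on version B (the rewrite author's own statement) =====
-- stated objective: simpler
-- what changed: Replaces A's three-table pipeline (bl_count histogram, next_code prefix-shift recurrence, mutable per-length counters) by a single loop that computes each symbol's canonical code in closed form: sum of 2**(l-x) over shorter positive lengths plus the symbol's rank among earlier equal lengths.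
import Mathlib
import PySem

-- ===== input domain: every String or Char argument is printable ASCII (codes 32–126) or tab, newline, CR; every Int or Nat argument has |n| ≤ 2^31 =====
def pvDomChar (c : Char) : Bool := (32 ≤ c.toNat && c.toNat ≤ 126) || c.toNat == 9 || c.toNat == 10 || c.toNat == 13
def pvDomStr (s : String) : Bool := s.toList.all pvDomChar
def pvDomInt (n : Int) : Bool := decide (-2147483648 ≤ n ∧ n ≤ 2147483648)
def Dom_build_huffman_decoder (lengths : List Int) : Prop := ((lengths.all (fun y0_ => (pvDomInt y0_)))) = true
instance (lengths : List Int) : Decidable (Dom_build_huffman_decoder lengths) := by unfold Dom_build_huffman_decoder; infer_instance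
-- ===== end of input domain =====

-- B replaces A's bl_count/next_code table pipeline by a per-symbol closed-form code (objective: simpler).

-- ===== PORT A =====
-- loop body of 'for length in lengths: if length > 0: bl_count[length] += 1'
def aBlStep (bl : List Int) (length : Int) : List Int :=
  if length > 0 then PySem.List.pySetD bl length (PySem.List.pyGetD bl length 0 + 1) else bl

-- loop body of 'for bits in range(1, max_len + 1): code = (code + bl_count[bits-1]) << 1; next_code[bits] = code'
def aCodeStep (bl_count : List Int) (cn : Int × List Int) (bits : Int) : Int × List Int :=
  let code := (cn.1 + PySem.List.pyGetD bl_count (bits - 1) 0) <<< (1 : Nat)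
  (code, PySem.List.pySetD cn.2 bits code)

-- loop body of 'for symbol, length in enumerate(lengths): if length > 0: decoder[...] = symbol; next_code[length] += 1'
def aAssignStep (dn : PySem.Dict (Int × Int) Int × List Int) (p : Int × Int) :
    PySem.Dict (Int × Int) Int × List Int :=
  if p.2 > 0 then
    (dn.1.insert (PySem.List.pyGetD dn.2 p.2 0, p.2) p.1,
     PySem.List.pySetD dn.2 p.2 (PySem.List.pyGetD dn.2 p.2 0 + 1))
  else dn

def build_huffman_decoder (lengths : List Int) : List (Int × Int × Int) :=
  -- 'if not lengths or max(lengths) == 0: return {}'; max? is some on the nonempty lists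
  -- that reach the second disjunct, so .getD 0 is never the default
  if lengths.isEmpty ∨ (PySem.List.max? lengths (fun y => y)).getD 0 = 0 then [] else
    let max_len := (PySem.List.max? lengths (fun y => y)).getD 0
    let bl_count := lengths.foldl aBlStep (List.replicate (max_len + 1).toNat 0)
    let cn := (PySem.List.pyRange 1 (max_len + 1) 1).foldl (aCodeStep bl_count)
                (0, List.replicate (max_len + 1).toNat 0)
    let dn := (PySem.List.enumerate lengths 0).foldl aAssignStep (PySem.Dict.empty, cn.2)
    dn.1.items.map (fun kv => (kv.1.1, kv.1.2, kv.2))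

-- ===== PORT B =====
-- 'sum(2 ** (l - x) for x in lengths if 0 < x < l)'
def altStart (lengths : List Int) (l : Int) : Int :=
  ((lengths.filter (fun x => 0 < x ∧ x < l)).map (fun x => (2:Int) ^ (l - x).toNat)).sum

-- loop body of B's single 'for s, l in enumerate(lengths)' loop
def altStep (lengths : List Int) (d : PySem.Dict (Int × Int) Int) (p : Int × Int) :
    PySem.Dict (Int × Int) Int :=
  if p.2 > 0 then
    let code := altStart lengths p.2 +
      (((PySem.List.slice lengths none (some p.1)).filter (fun x => x == p.2)).map
        (fun _ => (1:Int))).sum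
    d.insert (code, p.2) p.1
  else d

def build_huffman_decoder_alt (lengths : List Int) : List (Int × Int × Int) :=
  let d := (PySem.List.enumerate lengths 0).foldl (altStep lengths) PySem.Dict.empty
  d.items.map (fun kv => (kv.1.1, kv.1.2, kv.2))

-- ===== PRECONDITION & SPEC =====
def Spec_build_huffman_decoder (lengths : List Int) (out : List (Int × Int × Int)) : Prop := out = build_huffman_decoder_alt lengths
instance (lengths : List Int) (out : List (Int × Int × Int)) : Decidable (Spec_build_huffman_decoder lengths out) := by unfold Spec_build_huffman_decoder; infer_instance

-- ===== CLAIM (what is proved, stated in full; the proofs are below) =====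
def Claim_equal_build_huffman_decoder : Prop := ∀ (lengths : List Int), Dom_build_huffman_decoder lengths → Spec_build_huffman_decoder lengths (build_huffman_decoder lengths)

-- ===== LEMMAS AND PROOFS =====

-- count of value i among the positive lengths (0 for non-positive i); = what bl_count[i] holds
def cntA (L : List Int) (i : Int) : Int :=
  if 0 < i then (L.countP (fun x => x == i) : Int) else 0

theorem altStart_cons (x : Int) (t : List Int) (b : Int) :
    altStart (x :: t) b = (if 0 < x ∧ x < b then (2:Int)^(b-x).toNat else 0) + altStart t b := by
  by_cases h : 0 < x ∧ x < b <;> simp [altStart, h]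

theorem cntA_cons (x : Int) (t : List Int) (i : Int) :
    cntA (x :: t) i = (if x = i ∧ 0 < i then (1:Int) else 0) + cntA t i := by
  by_cases h0 : 0 < i
  · by_cases hx : x = i <;> simp [cntA, h0, hx] <;> ring
  · simp [cntA, h0]

-- recurrence behind A's 'code = (code + bl_count[bits-1]) << 1'
theorem altStart_rec (L : List Int) (b : Int) (hb : 1 ≤ b) :
    altStart L b = (altStart L (b - 1) + cntA L (b - 1)) * 2 := by
  induction L with
  | nil => simp [altStart, cntA]
  | cons x t ih =>
    rw [altStart_cons, altStart_cons, cntA_cons, ih]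
    have key : (if 0 < x ∧ x < b then (2:Int)^(b-x).toNat else 0) =
        ((if 0 < x ∧ x < b - 1 then (2:Int)^(b-1-x).toNat else 0) +
         (if x = b - 1 ∧ 0 < b - 1 then (1:Int) else 0)) * 2 := by
      by_cases h1 : 0 < x ∧ x < b - 1
      · have h2 : 0 < x ∧ x < b := ⟨h1.1, by omega⟩
        simp [h1, h2]
        have h4 : (b - x).toNat = (b - 1 - x).toNat + 1 := by omega
        rw [h4, pow_succ]
        have h5 : ¬ (x = b - 1 ∧ 1 < b) := by omega
        simp [h5]
      · by_cases h2 : x = b - 1 ∧ 0 < b - 1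
        · have h3 : 0 < x ∧ x < b := by omega
          have h4 : (b - x).toNat = 1 := by omega
          simp [h2]
        · have h3 : ¬ (0 < x ∧ x < b) := by omega
          simp [h1, h3]
          omega
    rw [key]; ring

-- Int-indexed glue around PySem.List.pyGetD_pySetD_natCast
theorem getD_setD_int (xs : List Int) (n i v : Int) (h0 : 0 ≤ n)
    (h1 : n.toNat < xs.length) (h2 : 0 ≤ i) :
    PySem.List.pyGetD (PySem.List.pySetD xs n v) i 0 =
      if i = n then v else PySem.List.pyGetD xs i 0 := by
  have hn : ((n.toNat : Nat) : Int) = n := by omega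
  have hi : ((i.toNat : Nat) : Int) = i := by omega
  rw [← hn, ← hi, PySem.List.pyGetD_pySetD_natCast _ _ _ _ _ h1, hi]
  by_cases hb : i = n
  · rw [if_pos (by omega : i.toNat = n.toNat), if_pos (by omega : i = ((n.toNat : Nat) : Int))]
  · rw [if_neg (by omega : ¬ i.toNat = n.toNat), if_neg (by omega : ¬ i = ((n.toNat : Nat) : Int))]

theorem bl_loop_get (L : List Int) (st : List Int)
    (h : ∀ x ∈ L, 0 < x → x.toNat < st.length) (i : Int) (hi : 0 ≤ i) :
    PySem.List.pyGetD (L.foldl aBlStep st) i 0 = PySem.List.pyGetD st i 0 + cntA L i := by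
  induction L generalizing st with
  | nil => simp [cntA]
  | cons x t ih =>
    simp only [List.foldl_cons]
    rw [cntA_cons]
    by_cases hx : x > 0
    · have hlen : x.toNat < st.length := h x (by simp) hx
      have hst : aBlStep st x =
          PySem.List.pySetD st x (PySem.List.pyGetD st x 0 + 1) := by
        simp [aBlStep, hx]
      rw [hst, ih]
      · rw [getD_setD_int st x i _ (by omega) hlen hi]
        by_cases hxi : i = x
        · subst hxi
          rw [if_pos rfl, if_pos ⟨rfl, hx⟩]
          ring
        · rw [if_neg hxi, if_neg (by omega : ¬ (x = i ∧ 0 < i))]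
          ring
      · intro y hy hy0
        rw [PySem.List.length_pySetD]
        exact h y (by simp [hy]) hy0
    · have hst : aBlStep st x = st := by simp [aBlStep, hx]
      rw [hst, ih st (fun y hy hy0 => h y (by simp [hy]) hy0)]
      have h3 : ¬ (x = i ∧ 0 < i) := by omega
      simp [h3]

theorem altStart_zero (L : List Int) : altStart L 0 = 0 := by
  induction L with
  | nil => rfl
  | cons x t ih => rw [altStart_cons, ih]; simp; omega

-- next_code loop characterisation
theorem nc_loop (L : List Int) (M : Int) (bl : List Int)
    (hbl : ∀ i : Int, 0 ≤ i → i ≤ M → PySem.List.pyGetD bl i 0 = cntA L i)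
    (k : Nat) (hk : (k : Int) ≤ M) :
    ∃ nc : List Int,
      (PySem.List.pyRange 1 ((k : Int) + 1) 1).foldl (aCodeStep bl)
          (0, List.replicate (M + 1).toNat 0) = (altStart L k, nc) ∧
      nc.length = (M + 1).toNat ∧
      (∀ i : Int, 1 ≤ i → i ≤ M →
        PySem.List.pyGetD nc i 0 = if i ≤ (k : Int) then altStart L i else 0) := by
  induction k with
  | zero =>
    refine ⟨List.replicate (M + 1).toNat 0, ?_, by simp, ?_⟩
    · rw [PySem.List.pyRange_one_eq_nil (by omega)]
      simp [altStart_zero]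
    · intro i h1 h2
      rw [if_neg (by omega)]
      rw [PySem.List.pyGetD_eq_getElem _ _ (by omega) (by simp; omega)]
      exact List.getElem_replicate _
  | succ k ih =>
    have hk' : (k : Int) ≤ M := by push_cast at hk ⊢; omega
    obtain ⟨nc, hfold, hlen, hget⟩ := ih hk'
    have hsplit : PySem.List.pyRange 1 (((k + 1 : Nat) : Int) + 1) 1 =
        PySem.List.pyRange 1 ((k : Int) + 1) 1 ++ [(k : Int) + 1] := by
      have : (((k + 1 : Nat) : Int) + 1) = ((k : Int) + 1) + 1 := by push_cast; ring
      rw [this, PySem.List.pyRange_one_succ_right (by omega)]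
    rw [hsplit, List.foldl_append, hfold]
    have hcode : (altStart L (k : Int) + PySem.List.pyGetD bl (((k : Int) + 1) - 1) 0) <<< (1 : Nat)
        = altStart L ((k : Int) + 1) := by
      have h1 : (((k : Int) + 1) - 1) = (k : Int) := by ring
      rw [h1, hbl (k : Int) (by omega) hk']
      rw [altStart_rec L ((k : Int) + 1) (by omega)]
      have h2 : ((k : Int) + 1 - 1) = (k : Int) := by ring
      rw [h2, Int.shiftLeft_eq]
      ring
    refine ⟨PySem.List.pySetD nc ((k : Int) + 1) (altStart L ((k : Int) + 1)), ?_, ?_, ?_⟩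
    · have hc : ((k + 1 : Nat) : Int) = (k : Int) + 1 := by push_cast; ring
      rw [hc]
      show ((altStart L (k : Int) + PySem.List.pyGetD bl (((k : Int) + 1) - 1) 0) <<< (1 : Nat),
            PySem.List.pySetD nc ((k : Int) + 1)
              ((altStart L (k : Int) + PySem.List.pyGetD bl (((k : Int) + 1) - 1) 0) <<< (1 : Nat))) = _
      rw [hcode]
    · rw [PySem.List.length_pySetD]; exact hlen
    · intro i h1 h2
      rw [getD_setD_int nc ((k : Int) + 1) i _ (by omega)
          (by rw [hlen]; omega) (by omega)]
      by_cases hik : i = (k : Int) + 1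
      · rw [if_pos hik, if_pos (by push_cast; omega), hik]
      · rw [if_neg hik, hget i h1 h2]
        by_cases hle : i ≤ (k : Int)
        · rw [if_pos hle, if_pos (by push_cast; omega)]
        · rw [if_neg hle, if_neg (by push_cast; omega)]

-- assignment loop: A's stateful next_code walk produces exactly B's closed-form inserts
theorem assign_loop (L : List Int) (M : Int) (hmax : ∀ x ∈ L, x ≤ M) :
    ∀ (suf pre : List Int) (nc : List Int) (d : PySem.Dict (Int × Int) Int),
      L = pre ++ suf →
      nc.length = (M + 1).toNat →
      (∀ i : Int, 1 ≤ i → i ≤ M →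
        PySem.List.pyGetD nc i 0 = altStart L i + (pre.countP (fun x => x == i) : Int)) →
      ((PySem.List.enumerate suf (pre.length : Int)).foldl aAssignStep (d, nc)).1 =
        (PySem.List.enumerate suf (pre.length : Int)).foldl (altStep L) d := by
  intro suf
  induction suf with
  | nil => intro pre nc d _ _ _; simp [PySem.List.enumerate]
  | cons l rest ih =>
    intro pre nc d hL hlen hnc
    rw [PySem.List.enumerate_cons]
    simp only [List.foldl_cons]
    have hpre1 : (((pre ++ [l]).length : Nat) : Int) = (pre.length : Int) + 1 := by
      simp
    by_cases hl : l > 0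
    · have hlM : l ≤ M := hmax l (by rw [hL]; simp)
      have hrank : (((PySem.List.slice L none (some (pre.length : Int))).filter
            (fun x => x == l)).map (fun _ => (1:Int))).sum
          = (pre.countP (fun x => x == l) : Int) := by
        rw [PySem.List.slice_to _ (by omega)]
        have ht : (((pre.length : Nat) : Int)).toNat = pre.length := by omega
        rw [ht, hL, List.take_left]
        rw [PySem.List.sum_map_const_int, List.countP_eq_length_filter]
        ring
      have hstepA : aAssignStep (d, nc) ((pre.length : Int), l) =
          (d.insert (PySem.List.pyGetD nc l 0, l) (pre.length : Int),
           PySem.List.pySetD nc l (PySem.List.pyGetD nc l 0 + 1)) := by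
        simp [aAssignStep, hl]
      have hstepB : altStep L d ((pre.length : Int), l) =
          d.insert (altStart L l + (pre.countP (fun x => x == l) : Int), l)
            (pre.length : Int) := by
        simp only [altStep]
        rw [if_pos hl]
        simp only [hrank]
      rw [hstepA, hstepB, hnc l (by omega) hlM]
      have hia := ih (pre ++ [l])
        (PySem.List.pySetD nc l (altStart L l + (pre.countP (fun x => x == l) : Int) + 1))
        (d.insert (altStart L l + (pre.countP (fun x => x == l) : Int), l) (pre.length : Int))
        (by rw [hL]; simp)
        (by rw [PySem.List.length_pySetD]; exact hlen)
        ?_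
      · rw [hpre1] at hia
        exact hia
      · intro i h1 h2
        rw [getD_setD_int nc l i _ (by omega) (by rw [hlen]; omega) (by omega)]
        rw [List.countP_append]
        by_cases hli : i = l
        · subst hli
          rw [if_pos rfl]
          simp
          ring
        · rw [if_neg hli, hnc i h1 h2]
          have : ([l].countP (fun x => x == i)) = 0 := by
            simp; omega
          rw [this]
          simp
    · have hstepA : aAssignStep (d, nc) ((pre.length : Int), l) = (d, nc) := by
        simp [aAssignStep, hl]
      have hstepB : altStep L d ((pre.length : Int), l) = d := by
        simp [altStep, hl]
      rw [hstepA, hstepB]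
      have := ih (pre ++ [l]) nc d (by rw [hL]; simp) hlen ?_
      · rw [hpre1] at this
        exact this
      · intro i h1 h2
        rw [hnc i h1 h2, List.countP_append]
        have : ([l].countP (fun x => x == i)) = 0 := by
          simp; omega
        rw [this]
        simp

-- B inserts nothing when no length is positive
theorem alt_fold_no_pos (L full : List Int) (h : ∀ x ∈ L, x ≤ 0) :
    ∀ (s : Int) (d : PySem.Dict (Int × Int) Int),
      (PySem.List.enumerate L s).foldl (altStep full) d = d := by
  induction L with
  | nil => intro s d; simp [PySem.List.enumerate]
  | cons l rest ih =>
    intro s d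
    rw [PySem.List.enumerate_cons]
    simp only [List.foldl_cons]
    have hl : ¬ (l > 0) := by have := h l (by simp); omega
    have hstep : altStep full d (s, l) = d := by simp [altStep, hl]
    rw [hstep]
    exact ih (fun x hx => h x (by simp [hx])) (s + 1) d

-- ===== VERDICT (by name: the statement is the Claim_ definition above) =====
theorem build_huffman_decoder_spec : Claim_equal_build_huffman_decoder := by
  intro lengths _
  simp only [Spec_build_huffman_decoder, build_huffman_decoder, build_huffman_decoder_alt]
  by_cases hemp : lengths.isEmpty
  · have he : lengths = [] := List.isEmpty_iff.mp hemp
    subst he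
    decide
  · obtain ⟨M, hmaxc⟩ : ∃ M, PySem.List.max? lengths (fun y => y) = some M := by
      rcases h : PySem.List.max? lengths (fun y => y) with _ | M
      · exact absurd ((PySem.List.max?_eq_none_iff _ _).mp h) (by simpa using hemp)
      · exact ⟨M, rfl⟩
    rw [hmaxc]
    simp only [Option.getD_some]
    have hmaxall : ∀ x ∈ lengths, x ≤ M := fun x hx => PySem.List.max?_isMax hmaxc x hx
    by_cases hM0 : M = 0
    · rw [if_pos (Or.inr hM0)]
      rw [alt_fold_no_pos lengths lengths
        (fun x hx => by have := hmaxall x hx; omega) 0 PySem.Dict.empty]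
      rfl
    · rw [if_neg (by simp [hemp, hM0])]
      have hbl : ∀ i : Int, 0 ≤ i → i ≤ M →
          PySem.List.pyGetD (lengths.foldl aBlStep (List.replicate (M + 1).toNat 0)) i 0
            = cntA lengths i := by
        intro i h0 hM
        rw [bl_loop_get lengths _ ?_ i h0]
        · have hz : PySem.List.pyGetD (List.replicate (M + 1).toNat (0:Int)) i 0 = 0 := by
            rw [PySem.List.pyGetD_eq_getElem _ _ h0 (by simp; omega)]
            exact List.getElem_replicate _
          omega
        · intro x hx hx0
          have := hmaxall x hx
          simp
          omega
      by_cases hMpos : 1 ≤ M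
      · obtain ⟨nc, hfold, hlen, hget⟩ := nc_loop lengths M _ hbl M.toNat (by omega)
        have hcast : ((M.toNat : Nat) : Int) = M := by omega
        rw [hcast] at hfold hget
        rw [hfold]
        have hnc0 : ∀ i : Int, 1 ≤ i → i ≤ M →
            PySem.List.pyGetD nc i 0 =
              altStart lengths i + ((([] : List Int).countP (fun x => x == i)) : Int) := by
          intro i h1 h2
          rw [hget i h1 h2, if_pos h2]
          simp
        have hal := assign_loop lengths M hmaxall lengths [] nc PySem.Dict.empty
          (by simp) hlen hnc0
        simp only [List.length_nil, Nat.cast_zero] at hal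
        rw [hal]
      · have hMneg : M < 0 := by omega
        rw [PySem.List.pyRange_one_eq_nil (by omega)]
        simp only [List.foldl_nil]
        have hnc0 : ∀ i : Int, 1 ≤ i → i ≤ M →
            PySem.List.pyGetD (List.replicate (M + 1).toNat 0) i 0 =
              altStart lengths i + ((([] : List Int).countP (fun x => x == i)) : Int) := by
          intro i h1 h2
          omega
        have hal := assign_loop lengths M hmaxall lengths [] (List.replicate (M + 1).toNat 0)
          PySem.Dict.empty (by simp) (by simp) hnc0
        simp only [List.length_nil, Nat.cast_zero] at hal
        rw [hal]
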